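-- pv_equiv track=rewrite | github.com/jafrri/Data-Structures-and-Algorithms---Labs | DSA Lab 04.py | Enqueue
-- ===== SOURCE A (Python) =====
-- def Enqueue(queue, item, priority):
--     a = (item,priority)
--     if len(queue) > 1:
--         index  = len(queue)-1
--         while True:
--             if index == -1:
--                 queue.insert(0,a)
--                 return(queue)
--             elif queue[index][1] >= priority:
--                 queue.insert(index+1, a)
--                 return(queue)
--             elif queue[index][1] < priority:
--                 index = index - 1
--
--     elif len(queue) == 1:
--         if queue[0][1] >= priority:
--             queue.append(a)
--             return(queue)
--         else:
--             queue.insert(0,a)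
--             return(queue)
--
--
--     else:
--         queue.append(a)
-- ===== SOURCE B (Python) =====
-- def Enqueue(queue, item, priority):
--     pos = 0
--     for i, entry in enumerate(queue):
--         if entry[1] >= priority:
--             pos = i + 1
--     queue.insert(pos, (item, priority))
--     return queue
-- ===== Notes on version B (the rewrite author's own statement) =====
-- stated objective: simpler
-- what changed: A walks the queue back-to-front with a stateful while loop and three separate insert/return branches (plus special cases for length 0 and 1); B makes one forward enumerate pass computing the insertion index (one past the last entry whose priority is >= the new one) and performs a single list.insert, with no length case analysis.
-- outside the precondition, e.g. on Enqueue([], 1, 2): A returns None, B returns [(1, 2)]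
import Mathlib
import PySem

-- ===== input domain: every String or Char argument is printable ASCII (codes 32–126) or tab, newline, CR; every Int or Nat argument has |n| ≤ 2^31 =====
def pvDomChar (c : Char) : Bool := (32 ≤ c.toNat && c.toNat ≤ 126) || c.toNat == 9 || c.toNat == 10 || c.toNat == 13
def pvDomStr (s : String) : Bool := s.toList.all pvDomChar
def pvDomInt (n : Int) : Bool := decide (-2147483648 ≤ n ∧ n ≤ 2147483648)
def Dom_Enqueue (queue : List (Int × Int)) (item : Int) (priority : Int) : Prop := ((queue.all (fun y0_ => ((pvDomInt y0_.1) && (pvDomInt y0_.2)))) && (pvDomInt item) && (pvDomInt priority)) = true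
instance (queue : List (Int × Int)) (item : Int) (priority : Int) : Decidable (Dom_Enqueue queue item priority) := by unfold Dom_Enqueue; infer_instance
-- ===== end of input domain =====

-- B replaces A's back-to-front while loop and its length-0/1/many case analysis by a single
-- forward enumerate pass computing the insertion index followed by one list.insert (simpler).
-- Both A and B mutate the Python queue in place; the equivalence proved here is about the return value.


-- ===== PORT A =====
-- A's while loop: fuel n encodes index = n-1; n = 0 is the 'index == -1' case.
def EnqueueLoopA (queue : List (Int × Int)) (a : Int × Int) (priority : Int) : Nat → List (Int × Int)
  | 0 => PySem.List.insert queue 0 a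
  | n + 1 =>
    match PySem.List.pyGet? queue (n : Int) with
    | some q =>
        if q.2 ≥ priority then PySem.List.insert queue ((n : Int) + 1) a
        else EnqueueLoopA queue a priority n
    | none => queue  -- unreachable: index stays in range until it reaches -1

def Enqueue (queue : List (Int × Int)) (item : Int) (priority : Int) : List (Int × Int) :=
  let a := (item, priority)
  if queue.length > 1 then
    EnqueueLoopA queue a priority queue.length
  else if queue.length = 1 then
    match PySem.List.pyGet? queue 0 with
    | some q => if q.2 ≥ priority then queue ++ [a] else PySem.List.insert queue 0 a
    | none => queue  -- unreachable (length = 1)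
  else
    queue ++ [a]  -- Python A returns None here (falls through); excluded by Pre_Enqueue

-- ===== PORT B =====
def Enqueue_alt (queue : List (Int × Int)) (item : Int) (priority : Int) : List (Int × Int) :=
  let pos := (PySem.List.enumerate queue).foldl
    (fun pos e => if e.2.2 ≥ priority then e.1 + 1 else pos) 0
  PySem.List.insert queue pos (item, priority)

-- ===== PRECONDITION & SPEC =====
-- Pre_ excludes exactly the empty queue, on which A falls through its if/elif chain and
-- returns None — no value of the declared list type (B naturally returns [(item, priority)]).
def Pre_Enqueue (queue : List (Int × Int)) (_item : Int) (_priority : Int) : Prop := queue ≠ []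
instance (queue : List (Int × Int)) (item : Int) (priority : Int) : Decidable (Pre_Enqueue queue item priority) := by unfold Pre_Enqueue; infer_instance
def pvWitness_Enqueue : (List (Int × Int)) × Int × Int := ([(7, 5), (8, 2)], 9, 3)

def Spec_Enqueue (queue : List (Int × Int)) (item : Int) (priority : Int) (out : List (Int × Int)) : Prop := out = Enqueue_alt queue item priority
instance (queue : List (Int × Int)) (item : Int) (priority : Int) (out : List (Int × Int)) : Decidable (Spec_Enqueue queue item priority out) := by unfold Spec_Enqueue; infer_instance

-- ===== CLAIM (what is proved, stated in full; the proofs are below) =====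
def Claim_equal_Enqueue : Prop := ∀ (queue : List (Int × Int)) (item : Int) (priority : Int), Dom_Enqueue queue item priority → Pre_Enqueue queue item priority → Spec_Enqueue queue item priority (Enqueue queue item priority)

-- ===== LEMMAS AND PROOFS =====

-- B's fold over the enumerate of the first n elements (the insertion position after scanning them).
def posFold (l : List (Int × Int)) (priority : Int) : Int :=
  (PySem.List.enumerate l).foldl (fun pos e => if e.2.2 ≥ priority then e.1 + 1 else pos) 0

theorem enumerate_append_singleton (xs : List (Int × Int)) (y : Int × Int) (s : Int) :
    PySem.List.enumerate (xs ++ [y]) s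
      = PySem.List.enumerate xs s ++ [(s + xs.length, y)] := by
  induction xs generalizing s with
  | nil => simp [PySem.List.enumerate_cons, PySem.List.enumerate_nil]
  | cons x xs ih =>
      simp only [List.cons_append, PySem.List.enumerate_cons, ih, List.length_cons]
      push_cast
      ring_nf

theorem posFold_append (xs : List (Int × Int)) (y : Int × Int) (p : Int) :
    posFold (xs ++ [y]) p = if y.2 ≥ p then (xs.length : Int) + 1 else posFold xs p := by
  unfold posFold
  rw [enumerate_append_singleton, List.foldl_append]
  simp

theorem loopA_eq (queue : List (Int × Int)) (a : Int × Int) (p : Int) :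
    ∀ n, n ≤ queue.length →
      EnqueueLoopA queue a p n = PySem.List.insert queue (posFold (queue.take n) p) a := by
  intro n
  induction n with
  | zero => intro _; simp [EnqueueLoopA, posFold, PySem.List.enumerate_nil]
  | succ n ih =>
      intro h
      have hn : n < queue.length := by omega
      have htake : queue.take (n + 1) = queue.take n ++ [queue[n]] :=
        List.take_succ_eq_append_getElem hn
      rw [htake, posFold_append]
      simp only [EnqueueLoopA, PySem.List.pyGet?_natCast, List.getElem?_eq_getElem hn]
      by_cases hc : queue[n].2 ≥ p
      · simp [hc, List.length_take, Nat.min_eq_left (Nat.le_of_lt hn)]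
      · simp only [hc, if_false]
        exact ih (Nat.le_of_lt hn)

theorem Enqueue_eq_alt (queue : List (Int × Int)) (item : Int) (priority : Int)
    (hq : queue ≠ []) : Enqueue queue item priority = Enqueue_alt queue item priority := by
  match queue with
  | [] => exact absurd rfl hq
  | [q] =>
      show Enqueue [q] item priority = Enqueue_alt [q] item priority
      by_cases hc : q.2 ≥ priority <;>
        simp [Enqueue, Enqueue_alt, hc, PySem.List.enumerate_cons,
          PySem.List.enumerate_nil, PySem.List.insert, PySem.List.pyGet?, PySem.List.pyIdx?, PySem.List.sliceIndices]
  | x :: y :: rest =>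
      have h1 : Enqueue (x :: y :: rest) item priority
          = EnqueueLoopA (x :: y :: rest) (item, priority) priority (x :: y :: rest).length := by
        simp [Enqueue]
      rw [h1, loopA_eq _ _ _ _ (le_refl _), List.take_length]
      rfl

-- ===== VERDICT (by name: the statement is the Claim_ definition above) =====
theorem Enqueue_spec : Claim_equal_Enqueue := by
  intro queue item priority _ hpre
  unfold Spec_Enqueue
  exact Enqueue_eq_alt queue item priority hpre
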